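-- pv_equiv track=rewrite | github.com/brayvid/ocr-image-search | app.py | get_pagination_range
-- ===== SOURCE A (Python) =====
-- def get_pagination_range(current_page, total_pages):
--     if total_pages <= 1: return []
--     pages = set([1, 2, 3, total_pages, total_pages-1, total_pages-2, current_page, current_page-1, current_page+1])
--     sorted_pages = sorted([p for p in pages if 1 <= p <= total_pages])
--     res = []
--     prev = 0
--     for p in sorted_pages:
--         if prev and p - prev > 1: res.append(None)
--         res.append(p)
--         prev = p
--     return res
-- ===== SOURCE B (Python) =====
-- def merge_unique(xs, ys):
--     if not xs:
--         return list(ys)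
--     if not ys:
--         return list(xs)
--     if xs[0] < ys[0]:
--         return [xs[0]] + merge_unique(xs[1:], ys)
--     if ys[0] < xs[0]:
--         return [ys[0]] + merge_unique(xs, ys[1:])
--     return [xs[0]] + merge_unique(xs[1:], ys[1:])
--
-- def get_pagination_range(current_page, total_pages):
--     if total_pages <= 1:
--         return []
--     cand = merge_unique(
--         merge_unique([1, 2, 3], [current_page - 1, current_page, current_page + 1]),
--         [total_pages - 2, total_pages - 1, total_pages])
--     res = []
--     prev = 0
--     for p in cand:
--         if 1 <= p <= total_pages:
--             if prev and p - prev > 1: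
--                 res.append(None)
--             res.append(p)
--             prev = p
--     return res
-- ===== Notes on version B (the rewrite author's own statement) =====
-- stated objective: alternative
-- what changed: Replaces A's hash-set construction, bounds-filtering comprehension and sort with a recursive deduplicating merge of the three already-sorted candidate triples (first pages, around current, last pages), followed by one emit loop with an inline range check.
import Mathlib
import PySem

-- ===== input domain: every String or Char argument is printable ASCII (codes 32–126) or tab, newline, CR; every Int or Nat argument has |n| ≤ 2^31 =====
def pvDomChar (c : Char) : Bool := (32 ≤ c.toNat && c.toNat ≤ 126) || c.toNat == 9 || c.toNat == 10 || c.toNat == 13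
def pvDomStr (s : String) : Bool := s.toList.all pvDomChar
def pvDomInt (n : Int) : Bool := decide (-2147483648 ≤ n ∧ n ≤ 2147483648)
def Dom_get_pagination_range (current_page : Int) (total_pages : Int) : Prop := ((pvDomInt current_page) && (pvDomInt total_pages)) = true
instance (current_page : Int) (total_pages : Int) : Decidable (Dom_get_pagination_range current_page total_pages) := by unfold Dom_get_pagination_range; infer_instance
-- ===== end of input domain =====

-- B replaces A's hash-set + filter + sort pipeline by a recursive dedup-merge of the three
-- already-sorted candidate triples, then one emit loop with an inline range check (objective: alternative).

-- ===== PORT A =====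
def get_pagination_range (current_page : Int) (total_pages : Int) : List (Option Int) :=
  if total_pages ≤ 1 then [] else
    let pages : PySem.Set Int := PySem.Set.ofList
      [1, 2, 3, total_pages, total_pages - 1, total_pages - 2,
       current_page, current_page - 1, current_page + 1]
    -- [p for p in pages if 1 <= p <= total_pages] then sorted: the identity-key sort of the
    -- filtered set is independent of the set's iteration order (elements are distinct)
    let sorted_pages := PySem.List.sorted
      (pages.filter (fun p => decide (1 ≤ p ∧ p ≤ total_pages))) (fun x => x) false
    (sorted_pages.foldl
      (fun (st : List (Option Int) × Int) p =>
        ((if st.2 ≠ 0 ∧ p - st.2 > 1 then st.1 ++ [none] else st.1) ++ [some p], p))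
      ([], 0)).1

-- ===== PORT B =====
def mergeUnique : List Int → List Int → List Int
  | [], ys => ys
  | x :: xs, [] => x :: xs
  | x :: xs, y :: ys =>
    if x < y then x :: mergeUnique xs (y :: ys)
    else if y < x then y :: mergeUnique (x :: xs) ys
    else x :: mergeUnique xs ys
termination_by xs ys => xs.length + ys.length

def get_pagination_range_alt (current_page : Int) (total_pages : Int) : List (Option Int) :=
  if total_pages ≤ 1 then [] else
    let cand := mergeUnique
      (mergeUnique [1, 2, 3] [current_page - 1, current_page, current_page + 1])
      [total_pages - 2, total_pages - 1, total_pages]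
    (cand.foldl
      (fun (st : List (Option Int) × Int) p =>
        if 1 ≤ p ∧ p ≤ total_pages then
          ((if st.2 ≠ 0 ∧ p - st.2 > 1 then st.1 ++ [none] else st.1) ++ [some p], p)
        else st)
      ([], 0)).1

-- ===== PRECONDITION & SPEC =====
def Spec_get_pagination_range (current_page : Int) (total_pages : Int) (out : List (Option Int)) : Prop := out = get_pagination_range_alt current_page total_pages
instance (current_page : Int) (total_pages : Int) (out : List (Option Int)) : Decidable (Spec_get_pagination_range current_page total_pages out) := by unfold Spec_get_pagination_range; infer_instance

-- ===== CLAIM (what is proved, stated in full; the proofs are below) =====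
def Claim_equal_get_pagination_range : Prop := ∀ (current_page : Int) (total_pages : Int), Dom_get_pagination_range current_page total_pages → Spec_get_pagination_range current_page total_pages (get_pagination_range current_page total_pages)

-- ===== LEMMAS AND PROOFS =====

theorem mem_mergeUnique (a : Int) : ∀ (xs ys : List Int),
    a ∈ mergeUnique xs ys ↔ a ∈ xs ∨ a ∈ ys
  | [], ys => by simp [mergeUnique]
  | x :: xs, [] => by simp [mergeUnique]
  | x :: xs, y :: ys => by
    unfold mergeUnique
    split_ifs with h1 h2
    · simp [mem_mergeUnique a xs (y :: ys)]; tauto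
    · simp [mem_mergeUnique a (x :: xs) ys]; tauto
    · have hxy : x = y := le_antisymm (not_lt.mp h2) (not_lt.mp h1)
      subst hxy
      simp [mem_mergeUnique a xs ys]; tauto
termination_by xs ys => xs.length + ys.length

theorem pairwise_mergeUnique : ∀ (xs ys : List Int),
    xs.Pairwise (· < ·) → ys.Pairwise (· < ·) →
    (mergeUnique xs ys).Pairwise (· < ·)
  | [], ys => fun _ hy => by simpa [mergeUnique] using hy
  | x :: xs, [] => fun hx _ => by simpa [mergeUnique] using hx
  | x :: xs, y :: ys => fun hx hy => by
    unfold mergeUnique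
    rcases List.pairwise_cons.mp hx with ⟨hxall, hxs⟩
    rcases List.pairwise_cons.mp hy with ⟨hyall, hys⟩
    split_ifs with h1 h2
    · refine List.pairwise_cons.mpr ⟨?_, pairwise_mergeUnique xs (y :: ys) hxs hy⟩
      intro z hz
      rcases (mem_mergeUnique z xs (y :: ys)).mp hz with h | h
      · exact hxall z h
      · rcases List.mem_cons.mp h with rfl | h
        · exact h1
        · exact h1.trans (hyall z h)
    · refine List.pairwise_cons.mpr ⟨?_, pairwise_mergeUnique (x :: xs) ys hx hys⟩
      intro z hz
      rcases (mem_mergeUnique z (x :: xs) ys).mp hz with h | h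
      · rcases List.mem_cons.mp h with rfl | h
        · exact h2
        · exact h2.trans (hxall z h)
      · exact hyall z h
    · have hxy : x = y := le_antisymm (not_lt.mp h2) (not_lt.mp h1)
      subst hxy
      refine List.pairwise_cons.mpr ⟨?_, pairwise_mergeUnique xs ys hxs hys⟩
      intro z hz
      rcases (mem_mergeUnique z xs ys).mp hz with h | h
      · exact hxall z h
      · exact hyall z h
termination_by xs ys => xs.length + ys.length

theorem cand_pairwise (c n : Int) :
    (mergeUnique (mergeUnique [1, 2, 3] [c - 1, c, c + 1]) [n - 2, n - 1, n]).Pairwise (· < ·) := by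
  refine pairwise_mergeUnique _ _ (pairwise_mergeUnique _ _ ?_ ?_) ?_ <;> simp <;> omega

-- A's sorted filtered set equals B's filtered merge: same membership, both strictly increasing.
theorem pagination_lists_eq (c n : Int) :
    PySem.List.sorted
      ((PySem.Set.ofList [1, 2, 3, n, n - 1, n - 2, c, c - 1, c + 1] :
          PySem.Set Int).filter (fun p => decide (1 ≤ p ∧ p ≤ n)))
      (fun x => x) false
      = (mergeUnique (mergeUnique [1, 2, 3] [c - 1, c, c + 1]) [n - 2, n - 1, n]).filter
          (fun p => decide (1 ≤ p ∧ p ≤ n)) := by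
  apply PySem.List.sorted_eq_of_perm_of_pairwise_lt
  · apply (List.perm_ext_iff_of_nodup
      (((cand_pairwise c n).imp fun h => ne_of_lt h).filter _)
      ((PySem.Set.nodup_ofList _).filter _)).mpr
    intro x
    simp only [List.mem_filter, mem_mergeUnique, PySem.Set.mem_ofList,
      List.mem_cons, List.not_mem_nil, or_false, decide_eq_true_eq]
    omega
  · exact (cand_pairwise c n).filter _

-- ===== VERDICT (by name: the statement is the Claim_ definition above) =====
theorem get_pagination_range_spec : Claim_equal_get_pagination_range := by
  intro c n _
  unfold Spec_get_pagination_range get_pagination_range get_pagination_range_alt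
  by_cases h : n ≤ 1
  · simp [h]
  · simp only [h, if_false]
    rw [PySem.List.foldl_ite_eq_foldl_filter, ← pagination_lists_eq]
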